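-- pv_equiv track=rewrite | github.com/pootinx/rsa | rsaayoub.py | dech
-- ===== SOURCE A (Python) =====
-- def dech(lesvals):
--     e = 5
--     dd = 13
--     n = 85
--     ch = {}
--     for j in lesvals:
--         j = int(j)
--         x = (j ** dd) % n
--         ch[j] = x
--     return ch
-- ===== SOURCE B (Python) =====
-- def dech(lesvals):
--     # (j**13) % 85 depends only on j % 85: precompute the 85 residues once,
--     # then each element is a single table lookup.
--     table = [pow(r, 13, 85) for r in range(85)]
--     ch = {}
--     for j in lesvals:
--         j = int(j)
--         ch[j] = table[j % 85]
--     return ch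
-- ===== Notes on version B (the rewrite author's own statement) =====
-- stated objective: alternative
-- what changed: B precomputes an 85-entry table of 13th-power residues once and replaces A's per-element exponentiation by a table lookup at j % 85 (correct since (j**13)%85 depends only on j%85).
import Mathlib
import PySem

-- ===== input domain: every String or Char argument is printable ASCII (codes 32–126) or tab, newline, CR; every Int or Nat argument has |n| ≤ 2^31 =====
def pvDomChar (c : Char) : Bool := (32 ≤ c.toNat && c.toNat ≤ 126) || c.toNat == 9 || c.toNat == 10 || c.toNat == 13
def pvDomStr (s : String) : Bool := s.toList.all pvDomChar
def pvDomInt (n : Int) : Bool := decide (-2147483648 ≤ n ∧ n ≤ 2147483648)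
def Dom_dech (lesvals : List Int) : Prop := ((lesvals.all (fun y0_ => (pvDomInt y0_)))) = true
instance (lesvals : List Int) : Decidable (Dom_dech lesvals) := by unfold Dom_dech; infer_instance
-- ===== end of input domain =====

-- B replaces A's per-element modular exponentiation by a precomputed 85-entry residue table indexed by j % 85.

-- ===== PORT A =====
def dech (lesvals : List Int) : List (Int × Int) :=
  (lesvals.foldl (fun ch j =>
      ch.insert j (PySem.Int.mod (j ^ (13:Nat)) 85))
    (PySem.Dict.empty : PySem.Dict Int Int)).items

-- ===== PORT B =====
-- table = [pow(r, 13, 85) for r in range(85)]; table[j % 85] is always in range,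
-- so pyGetD with default 0 is exact here.
def dechTable : List Int :=
  (PySem.List.pyRange 0 85 1).map (fun r => PySem.Int.mod (r ^ (13:Nat)) 85)

def dech_alt (lesvals : List Int) : List (Int × Int) :=
  (lesvals.foldl (fun ch j =>
      ch.insert j (PySem.List.pyGetD dechTable (PySem.Int.mod j 85) 0))
    (PySem.Dict.empty : PySem.Dict Int Int)).items

-- ===== PRECONDITION & SPEC =====
def Spec_dech (lesvals : List Int) (out : List (Int × Int)) : Prop := out = dech_alt lesvals
instance (lesvals : List Int) (out : List (Int × Int)) : Decidable (Spec_dech lesvals out) := by unfold Spec_dech; infer_instance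

-- ===== CLAIM (what is proved, stated in full; the proofs are below) =====
def Claim_equal_dech : Prop := ∀ (lesvals : List Int), Dom_dech lesvals → Spec_dech lesvals (dech lesvals)

-- ===== LEMMAS AND PROOFS =====

-- the table lookup at j % 85 is exactly (j^13) % 85
theorem dechTable_lookup (j : Int) :
    PySem.List.pyGetD dechTable (PySem.Int.mod j 85) 0 = PySem.Int.mod (j ^ (13:Nat)) 85 := by
  have hm : ∀ a : Int, PySem.Int.mod a 85 = a % 85 := fun a =>
    PySem.Int.mod_eq_emod_of_pos (by norm_num)
  have h0 : (0:Int) ≤ PySem.Int.mod j 85 := by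
    rw [hm]; exact Int.emod_nonneg j (by norm_num)
  have h1 : PySem.Int.mod j 85 < 85 := by
    rw [hm]; exact Int.emod_lt_of_pos j (by norm_num)
  unfold dechTable
  rw [PySem.List.pyGetD_map_pyRange_of_nonneg _ _ _ _ h0 h1]
  rw [hm, hm, hm]
  exact Int.ModEq.pow 13 (Int.emod_emod_of_dvd j dvd_rfl)

-- ===== VERDICT (by name: the statement is the Claim_ definition above) =====
theorem dech_spec : Claim_equal_dech := by
  intro lesvals _
  unfold Spec_dech dech dech_alt
  congr 2
  funext ch j
  rw [dechTable_lookup]
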